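-- pv_equiv track=rewrite | github.com/naoki2222/Multi-LR | makeindex.py | make_file_index_list
-- ===== SOURCE A (Python) =====
-- def make_file_index_list(commit_files):
--
--     m_list = []
--     for version in commit_files.keys():
--         for file_name in commit_files[version]:
--             if file_name not in m_list:
--                 m_list.append(file_name)
--
--     file_index = {}
--     index = 0
--     for f in m_list:
--         file_index[f] = index
--         index += 1
--
--     file_index_set = {}
--     for v in list(commit_files.keys()):
--         file_list = []
--         for file_name in commit_files[v]:
--             file_list.append(file_index[file_name])
--         file_index_set[v] = file_list
--
--     file_index_list = []
--     for version in list(file_index_set.keys()):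
--         file_index_list.append(file_index_set[version])
--     file_index_list
--
--     return file_index, file_index_list
-- ===== SOURCE B (Python) =====
-- def make_file_index_list(commit_files):
--     file_index = {}
--     file_index_list = []
--     for files in commit_files.values():
--         row = []
--         for file_name in files:
--             if file_name not in file_index:
--                 file_index[file_name] = len(file_index)
--             row.append(file_index[file_name])
--         file_index_list.append(row)
--     return file_index, file_index_list
-- ===== Notes on version B (the rewrite author's own statement) =====
-- stated objective: faster
-- what changed: One combined pass over commit_files assigns each new file name len(file_index) on first sight and emits each row immediately, replacing A's four passes (m_list dedup with O(F) list membership, index-assignment loop, file_index_set dict, values extraction).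
import Mathlib
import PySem

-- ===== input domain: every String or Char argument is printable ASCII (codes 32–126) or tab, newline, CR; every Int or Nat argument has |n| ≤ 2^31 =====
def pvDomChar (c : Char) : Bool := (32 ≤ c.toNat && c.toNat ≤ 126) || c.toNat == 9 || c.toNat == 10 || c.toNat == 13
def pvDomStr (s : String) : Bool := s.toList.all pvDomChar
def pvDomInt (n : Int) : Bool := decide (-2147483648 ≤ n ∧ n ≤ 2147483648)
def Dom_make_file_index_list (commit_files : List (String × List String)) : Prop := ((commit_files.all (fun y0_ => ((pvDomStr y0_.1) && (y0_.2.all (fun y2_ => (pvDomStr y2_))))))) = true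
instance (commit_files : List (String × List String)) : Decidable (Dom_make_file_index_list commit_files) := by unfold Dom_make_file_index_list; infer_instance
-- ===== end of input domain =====

-- B replaces A's four passes (list-membership dedup, index loop, row dict, values extraction)
-- by one combined pass over the dict that assigns len(file_index) to each new file name and
-- emits each row immediately.

-- ===== PORT A =====
-- the commit_files dict argument, decoded as Python's dict of the association list
-- (insertion order, later duplicate keys overwrite in place) — same decoding in both ports.
-- loop body of A's first pass: 'if file_name not in m_list: m_list.append(file_name)'
def pvDedupStep (m : List String) (file_name : String) : List String :=
  if file_name ∈ m then m else m ++ [file_name]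
-- loop body of A's second pass: 'file_index[f] = index; index += 1'
def pvIndexStep (s : PySem.Dict String Int × Int) (f : String) : PySem.Dict String Int × Int :=
  (s.1.insert f s.2, s.2 + 1)

def make_file_index_list (commit_files : List (String × List String)) : (List (String × Int)) × List (List Int) :=
  let d := PySem.Dict.ofList commit_files
  -- for version in commit_files.keys(): for file_name in commit_files[version]: …
  -- (commit_files[version] via getD: the key is iterated from d.keys, so it is present)
  let m_list : List String :=
    d.keys.foldl (fun m version => (d.getD version []).foldl pvDedupStep m) []
  let file_index : PySem.Dict String Int :=
    (m_list.foldl pvIndexStep (PySem.Dict.empty, 0)).1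
  -- file_index[file_name] via getD: every file name was collected into m_list, so present
  let file_index_set : PySem.Dict String (List Int) :=
    d.keys.foldl (fun fis version =>
      fis.insert version
        ((d.getD version []).foldl (fun fl file_name => fl ++ [file_index.getD file_name 0]) []))
      PySem.Dict.empty
  let file_index_list : List (List Int) :=
    file_index_set.keys.foldl (fun acc version => acc ++ [file_index_set.getD version []]) []
  (file_index.items, file_index_list)

-- ===== PORT B =====
-- inner loop body of B: assign a fresh index on first sight, then append the index to the row
def pvAltFile (t : PySem.Dict String Int × List Int) (file_name : String) :
    PySem.Dict String Int × List Int :=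
  let fi := if t.1.contains file_name then t.1 else t.1.insert file_name (t.1.size : Int)
  (fi, t.2 ++ [fi.getD file_name 0])
-- outer loop body of B: build one row, append it
def pvAltVersion (s : PySem.Dict String Int × List (List Int)) (files : List String) :
    PySem.Dict String Int × List (List Int) :=
  let t := files.foldl pvAltFile (s.1, [])
  (t.1, s.2 ++ [t.2])

def make_file_index_list_alt (commit_files : List (String × List String)) :
    (List (String × Int)) × List (List Int) :=
  let d := PySem.Dict.ofList commit_files
  let r := d.values.foldl pvAltVersion (PySem.Dict.empty, [])
  (r.1.items, r.2)

-- ===== PRECONDITION & SPEC =====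
def Spec_make_file_index_list (commit_files : List (String × List String)) (out : (List (String × Int)) × List (List Int)) : Prop := out = make_file_index_list_alt commit_files
instance (commit_files : List (String × List String)) (out : (List (String × Int)) × List (List Int)) : Decidable (Spec_make_file_index_list commit_files out) := by unfold Spec_make_file_index_list; infer_instance

-- ===== CLAIM (what is proved, stated in full; the proofs are below) =====
def Claim_equal_make_file_index_list : Prop := ∀ (commit_files : List (String × List String)), Dom_make_file_index_list commit_files → Spec_make_file_index_list commit_files (make_file_index_list commit_files)

-- ===== LEMMAS AND PROOFS =====

-- model: the file-index association list [(m₀, n), (m₁, n+1), …] for first-appearance list m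
def pvFI : List String → Int → List (String × Int)
  | [], _ => []
  | f :: t, n => (f, n) :: pvFI t (n + 1)

-- model: index of the first occurrence of f in m, counting from n (f ∈ m in all uses)
def pvIdx : List String → String → Int → Int
  | [], _, n => n
  | g :: t, f, n => if f = g then n else pvIdx t f (n + 1)

-- model: B's dict state after the first-appearance list m has been collected
def pvDm (m : List String) : PySem.Dict String Int := ⟨pvFI m 0⟩

-- model of B's inner loop output row
def pvRowB : List String → List String → List Int
  | _, [] => []
  | m, f :: t => pvIdx (pvDedupStep m f) f 0 :: pvRowB (pvDedupStep m f) t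

-- model of B's outer loop output rows
def pvRowsB : List String → List (List String) → List (List Int)
  | _, [] => []
  | m, fs :: t => pvRowB m fs :: pvRowsB (fs.foldl pvDedupStep m) t

theorem pvFI_append (m : List String) (f : String) (n : Int) :
    pvFI (m ++ [f]) n = pvFI m n ++ [(f, n + m.length)] := by
  induction m generalizing n with
  | nil => simp [pvFI]
  | cons a t ih => simp [pvFI, ih]; ring

theorem map_fst_pvFI (m : List String) (n : Int) : (pvFI m n).map Prod.fst = m := by
  induction m generalizing n with
  | nil => rfl
  | cons a t ih => simp [pvFI, ih]

theorem length_pvFI (m : List String) (n : Int) : (pvFI m n).length = m.length := by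
  have := congrArg List.length (map_fst_pvFI m n); simpa using this

theorem getD_mk_pvFI (m : List String) (f : String) (n : Int) (h : f ∈ m) :
    (PySem.Dict.mk (pvFI m n)).getD f 0 = pvIdx m f n := by
  induction m generalizing n with
  | nil => cases h
  | cons a t ih =>
      rw [PySem.Dict.getD_eq_get?_getD]
      show ((PySem.Dict.mk ((a, n) :: pvFI t (n + 1))).get? f).getD 0 = pvIdx (a :: t) f n
      rw [PySem.Dict.get?_mk_cons]
      by_cases hfa : f = a
      · simp [hfa, pvIdx]
      · have hft : f ∈ t := by cases h with
          | head => exact absurd rfl hfa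
          | tail _ h' => exact h'
        simp only [pvIdx, if_neg hfa]
        have := ih (n + 1) hft
        rw [PySem.Dict.getD_eq_get?_getD] at this
        simpa [beq_iff_eq, Ne.symm hfa] using this

theorem contains_mk_pvFI (m : List String) (f : String) (n : Int) :
    (PySem.Dict.mk (pvFI m n)).contains f = decide (f ∈ m) := by
  rw [PySem.Dict.contains_eq_decide_mem_keys]
  show decide (f ∈ (PySem.Dict.mk (pvFI m n)).items.map Prod.fst) = decide (f ∈ m)
  rw [show (PySem.Dict.mk (pvFI m n)).items = pvFI m n from rfl, map_fst_pvFI]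

theorem getD_pvDm (m : List String) (f : String) (h : f ∈ m) :
    (pvDm m).getD f 0 = pvIdx m f 0 := getD_mk_pvFI m f 0 h

theorem contains_pvDm (m : List String) (f : String) :
    (pvDm m).contains f = decide (f ∈ m) := contains_mk_pvFI m f 0

theorem prefix_pvDedupStep (m : List String) (f : String) : m <+: pvDedupStep m f := by
  unfold pvDedupStep; split
  · exact List.prefix_rfl
  · exact List.prefix_append m [f]

theorem prefix_foldl_pvDedupStep (m : List String) (fs : List String) :
    m <+: fs.foldl pvDedupStep m := by
  induction fs generalizing m with
  | nil => exact List.prefix_rfl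
  | cons f t ih => exact (prefix_pvDedupStep m f).trans (ih (pvDedupStep m f))

theorem prefix_foldl_foldl_pvDedupStep (m : List String) (rl : List (List String)) :
    m <+: rl.foldl (fun m fs => fs.foldl pvDedupStep m) m := by
  induction rl generalizing m with
  | nil => exact List.prefix_rfl
  | cons fs t ih => exact (prefix_foldl_pvDedupStep m fs).trans (ih _)

theorem mem_pvDedupStep_self (m : List String) (f : String) : f ∈ pvDedupStep m f := by
  unfold pvDedupStep; split
  · assumption
  · simp

theorem mem_foldl_pvDedupStep (m : List String) (fs : List String) (f : String) (h : f ∈ fs) :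
    f ∈ fs.foldl pvDedupStep m := by
  induction fs generalizing m with
  | nil => cases h
  | cons a t ih =>
      cases h with
      | head => exact (prefix_foldl_pvDedupStep _ t).subset (mem_pvDedupStep_self m f)
      | tail _ h' => exact ih (pvDedupStep m a) h'

theorem mem_mlist (rl : List (List String)) (m : List String) (fs : List String)
    (hfs : fs ∈ rl) (f : String) (hf : f ∈ fs) :
    f ∈ rl.foldl (fun m fs => fs.foldl pvDedupStep m) m := by
  induction rl generalizing m with
  | nil => cases hfs
  | cons a t ih =>
      rcases List.mem_cons.mp hfs with h | h
      · subst h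
        exact (prefix_foldl_foldl_pvDedupStep _ t).subset (mem_foldl_pvDedupStep m fs f hf)
      · exact ih _ h

theorem nodup_pvDedupStep (m : List String) (f : String) (h : m.Nodup) :
    (pvDedupStep m f).Nodup := by
  unfold pvDedupStep; split
  · exact h
  · next hf =>
      exact h.append (List.nodup_singleton f)
        (fun a ha hb => by simp at hb; exact hf (hb ▸ ha))

theorem nodup_foldl_pvDedupStep (m : List String) (fs : List String) (h : m.Nodup) :
    (fs.foldl pvDedupStep m).Nodup := by
  induction fs generalizing m with
  | nil => exact h
  | cons a t ih => exact ih _ (nodup_pvDedupStep m a h)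

theorem nodup_mlist (rl : List (List String)) (m : List String) (h : m.Nodup) :
    (rl.foldl (fun m fs => fs.foldl pvDedupStep m) m).Nodup := by
  induction rl generalizing m with
  | nil => exact h
  | cons a t ih => exact ih _ (nodup_foldl_pvDedupStep m a h)

theorem pvIdx_append (m t : List String) (f : String) (n : Int) (h : f ∈ m) :
    pvIdx (m ++ t) f n = pvIdx m f n := by
  induction m generalizing n with
  | nil => cases h
  | cons a s ih =>
      by_cases hfa : f = a
      · simp [pvIdx, hfa]
      · have hfs : f ∈ s := by cases h with
          | head => exact absurd rfl hfa
          | tail _ h' => exact h'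
        simp [pvIdx, hfa, ih _ hfs]

theorem pvIdx_prefix (m m' : List String) (f : String) (h : m <+: m') (hf : f ∈ m) :
    pvIdx m' f 0 = pvIdx m f 0 := by
  obtain ⟨t, rfl⟩ := h; exact pvIdx_append m t f 0 hf

-- A's index-assignment loop builds exactly pvFI
theorem fiLoopA (m : List String) (D : PySem.Dict String Int) (n : Int) (hm : m.Nodup)
    (hD : ∀ f ∈ m, D.contains f = false) :
    ((m.foldl pvIndexStep (D, n)).1).items = D.items ++ pvFI m n := by
  induction m generalizing D n with
  | nil => simp [pvFI]
  | cons f t ih =>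
      have hcf : D.contains f = false := hD f (List.mem_cons_self ..)
      have step : List.foldl pvIndexStep (D, n) (f :: t)
          = List.foldl pvIndexStep (D.insert f n, n + 1) t := rfl
      rw [step, ih (D.insert f n) (n + 1) hm.of_cons (fun g hg => by
        rw [PySem.Dict.contains_insert]
        have hgf : g ≠ f := fun e => (List.nodup_cons.mp hm).1 (e ▸ hg)
        simp [hgf, hD g (List.mem_cons_of_mem f hg)])]
      rw [PySem.Dict.items_insert_of_not_contains D n hcf]
      simp [pvFI]

-- B's inner loop, tracked against the model
theorem innerB (fs : List String) (m : List String) (r : List Int) :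
    fs.foldl pvAltFile (pvDm m, r) = (pvDm (fs.foldl pvDedupStep m), r ++ pvRowB m fs) := by
  induction fs generalizing m r with
  | nil => simp [pvRowB]
  | cons f t ih =>
      show List.foldl pvAltFile (pvAltFile (pvDm m, r) f) t = _
      by_cases hf : f ∈ m
      · have hd : pvDedupStep m f = m := by simp [pvDedupStep, hf]
        have hstep : pvAltFile (pvDm m, r) f = (pvDm m, r ++ [pvIdx m f 0]) := by
          unfold pvAltFile
          dsimp only
          rw [contains_pvDm m f]
          simp only [hf, decide_true, if_true]
          rw [getD_pvDm m f hf]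
        rw [hstep, ih m _]
        simp [pvRowB, hd]
      · have hd : pvDedupStep m f = m ++ [f] := by simp [pvDedupStep, hf]
        have hins : (pvDm m).insert f ((pvDm m).size : Int) = pvDm (m ++ [f]) := by
          apply PySem.Dict.ext
          rw [PySem.Dict.items_insert_of_not_contains _ _ (by simp [contains_pvDm, hf])]
          show pvFI m 0 ++ [(f, ((pvFI m 0).length : Int))] = pvFI (m ++ [f]) 0
          rw [pvFI_append, length_pvFI]; simp
        have hfm : f ∈ m ++ [f] := by simp
        have hstep : pvAltFile (pvDm m, r) f
            = (pvDm (m ++ [f]), r ++ [pvIdx (m ++ [f]) f 0]) := by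
          unfold pvAltFile
          dsimp only
          rw [contains_pvDm m f]
          simp only [hf, decide_false, Bool.false_eq_true, if_false, hins]
          rw [getD_pvDm (m ++ [f]) f hfm]
        rw [hstep, ih (m ++ [f]) _]
        simp [pvRowB, hd]

-- B's outer loop, tracked against the model
theorem outerB (rl : List (List String)) (m : List String) (rows : List (List Int)) :
    rl.foldl pvAltVersion (pvDm m, rows)
      = (pvDm (rl.foldl (fun m fs => fs.foldl pvDedupStep m) m), rows ++ pvRowsB m rl) := by
  induction rl generalizing m rows with
  | nil => simp [pvRowsB]
  | cons fs t ih =>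
      have hstep : pvAltVersion (pvDm m, rows) fs
          = (pvDm (fs.foldl pvDedupStep m), rows ++ [pvRowB m fs]) := by
        simp [pvAltVersion, innerB fs m []]
      calc List.foldl pvAltVersion (pvDm m, rows) (fs :: t)
          = List.foldl pvAltVersion (pvDm (fs.foldl pvDedupStep m), rows ++ [pvRowB m fs]) t := by
            show List.foldl pvAltVersion (pvAltVersion (pvDm m, rows) fs) t = _
            rw [hstep]
        _ = _ := by rw [ih]; simp [pvRowsB]

-- each model row equals the lookup row in any extension M' of the state reached after it
theorem pvRowB_eq (fs : List String) (m M' : List String)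
    (h : fs.foldl pvDedupStep m <+: M') :
    pvRowB m fs = fs.map (fun f => pvIdx M' f 0) := by
  induction fs generalizing m with
  | nil => rfl
  | cons f t ih =>
      have h1 : pvDedupStep m f <+: M' :=
        (prefix_foldl_pvDedupStep (pvDedupStep m f) t).trans h
      have : pvIdx (pvDedupStep m f) f 0 = pvIdx M' f 0 :=
        (pvIdx_prefix _ M' f h1 (mem_pvDedupStep_self m f)).symm
      simp [pvRowB, List.map_cons, this, ih (pvDedupStep m f) h]

theorem pvRowsB_eq (rl : List (List String)) (m M' : List String)
    (h : rl.foldl (fun m fs => fs.foldl pvDedupStep m) m <+: M') :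
    pvRowsB m rl = rl.map (fun fs => fs.map (fun f => pvIdx M' f 0)) := by
  induction rl generalizing m with
  | nil => rfl
  | cons fs t ih =>
      have hh : t.foldl (fun m fs => fs.foldl pvDedupStep m) (fs.foldl pvDedupStep m) <+: M' := h
      have h1 : fs.foldl pvDedupStep m <+: M' :=
        (prefix_foldl_foldl_pvDedupStep (fs.foldl pvDedupStep m) t).trans hh
      simp [pvRowsB, pvRowB_eq fs m M' h1, ih _ hh]

-- A's third pass: inserting fresh distinct keys appends
theorem fisLoop (ks : List String) (g : String → List Int) (D : PySem.Dict String (List Int))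
    (hnd : ks.Nodup) (hfresh : ∀ v ∈ ks, D.contains v = false) :
    (ks.foldl (fun fis version => fis.insert version (g version)) D).items
      = D.items ++ ks.map (fun v => (v, g v)) := by
  induction ks generalizing D with
  | nil => simp
  | cons v t ih =>
      have hcv : D.contains v = false := hfresh v (List.mem_cons_self ..)
      show (t.foldl (fun fis version => fis.insert version (g version)) (D.insert v (g v))).items = _
      rw [ih (D.insert v (g v)) hnd.of_cons (fun w hw => by
        rw [PySem.Dict.contains_insert]
        have hwv : w ≠ v := fun e => (List.nodup_cons.mp hnd).1 (e ▸ hw)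
        simp [hwv, hfresh w (List.mem_cons_of_mem v hw)])]
      rw [PySem.Dict.items_insert_of_not_contains D (g v) hcv]
      simp

theorem main_eq (cf : List (String × List String)) :
    make_file_index_list cf = make_file_index_list_alt cf := by
  unfold make_file_index_list make_file_index_list_alt
  dsimp only
  set d := PySem.Dict.ofList cf with hd
  have hnd : d.keys.Nodup := PySem.Dict.nodup_keys_ofList cf
  -- A's first pass over keys = the same dedup fold over d.values
  have hml : d.keys.foldl (fun m version => (d.getD version []).foldl pvDedupStep m) []
      = d.values.foldl (fun m fs => fs.foldl pvDedupStep m) [] := by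
    rw [PySem.Dict.values_eq_map_keys d hnd [], List.foldl_map]
  rw [hml]
  set M := d.values.foldl (fun m fs => fs.foldl pvDedupStep m) [] with hM
  have hMnd : M.Nodup := nodup_mlist d.values [] List.nodup_nil
  -- A's file_index dict is pvDm M
  have hfiA : (M.foldl pvIndexStep ((PySem.Dict.empty : PySem.Dict String Int), (0 : Int))).1
      = pvDm M := by
    apply PySem.Dict.ext
    rw [fiLoopA M PySem.Dict.empty 0 hMnd (fun f _ => by simp [pysem])]
    rfl
  rw [hfiA]
  -- every file name of every row is in M
  have hmem : ∀ v ∈ d.keys, ∀ f ∈ d.getD v [], f ∈ M := by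
    intro v hv f hf
    have hrow : d.getD v [] ∈ d.values := by
      rw [PySem.Dict.values_eq_map_keys d hnd []]
      exact List.mem_map_of_mem hv
    exact mem_mlist d.values [] (d.getD v []) hrow f hf
  -- A's third pass: items of file_index_set
  have hfis := fisLoop d.keys
    (fun version => (d.getD version []).foldl (fun fl file_name => fl ++ [(pvDm M).getD file_name 0]) [])
    PySem.Dict.empty hnd (fun v _ => by simp [pysem])
  set fis := d.keys.foldl (fun fis version =>
      fis.insert version
        ((d.getD version []).foldl (fun fl file_name => fl ++ [(pvDm M).getD file_name 0]) []))
    PySem.Dict.empty with hfisdef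
  have hfis_items : fis.items = d.keys.map (fun v =>
      (v, (d.getD v []).foldl (fun fl file_name => fl ++ [(pvDm M).getD file_name 0]) [])) := by
    rw [hfisdef, hfis]; rfl
  have hfiskeys : fis.keys = d.keys := by
    show fis.items.map Prod.fst = d.keys
    rw [hfis_items, List.map_map]
    simp [Function.comp_def]
  have hfisknd : fis.keys.Nodup := hfiskeys ▸ hnd
  -- A's fourth pass = fis.values
  have hfil : fis.keys.foldl (fun acc version => acc ++ [fis.getD version []]) []
      = fis.values := by
    rw [PySem.List.foldl_append_singleton_eq_map (fun version => fis.getD version []) fis.keys []]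
    rw [PySem.Dict.values_eq_map_keys fis hfisknd []]
    rfl
  rw [hfil]
  have hvalsA : fis.values = d.keys.map (fun v =>
      (d.getD v []).foldl (fun fl file_name => fl ++ [(pvDm M).getD file_name 0]) []) := by
    show fis.items.map Prod.snd = _
    rw [hfis_items, List.map_map]
    rfl
  rw [hvalsA]
  -- B's side: run the model
  have hempty : (PySem.Dict.empty : PySem.Dict String Int) = pvDm [] := PySem.Dict.ext rfl
  rw [hempty, outerB d.values [] []]
  have hrowsB : pvRowsB [] d.values
      = d.values.map (fun fs => fs.map (fun f => pvIdx M f 0)) :=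
    pvRowsB_eq d.values [] M (by rw [hM])
  rw [hrowsB]
  -- both components agree
  refine Prod.ext rfl ?_
  show d.keys.map (fun v =>
      (d.getD v []).foldl (fun fl file_name => fl ++ [(pvDm M).getD file_name 0]) [])
    = d.values.map (fun fs => fs.map (fun f => pvIdx M f 0))
  rw [PySem.Dict.values_eq_map_keys d hnd [], List.map_map]
  apply List.map_congr_left
  intro v hv
  show (d.getD v []).foldl (fun fl file_name => fl ++ [(pvDm M).getD file_name 0]) []
      = (d.getD v []).map (fun f => pvIdx M f 0)
  rw [PySem.List.foldl_append_singleton_eq_map (fun file_name => (pvDm M).getD file_name 0) (d.getD v []) []]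
  simp only [List.nil_append]
  apply List.map_congr_left
  intro f hf
  exact getD_mk_pvFI M f 0 (hmem v hv f hf)

-- ===== VERDICT (by name: the statement is the Claim_ definition above) =====
theorem make_file_index_list_spec : Claim_equal_make_file_index_list := by
  intro cf _
  show make_file_index_list cf = make_file_index_list_alt cf
  exact main_eq cf
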